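-- pv_equiv track=rewrite | github.com/mrityu75/guardian-bed_treehacks | vitalguard-software/data/voice_agent.py | _local_summarize
-- ===== SOURCE A (Python) =====
-- def _local_summarize(entries: list, patient_name: str) -> str:
--     """Fallback: rule-based summary without LLM."""
--     texts = [e["text"].lower() for e in entries if e.get("text")]
--     if not texts:
--         return "No voice data recorded."
--
--     pain_keywords = ["pain", "hurt", "hurting", "ache", "uncomfortable", "pressure", "unbearable"]
--     distress_keywords = ["help", "can't breathe", "dizzy", "fall", "wrong", "doctor", "chest"]
--     request_keywords = ["water", "medication", "reposition", "nurse", "bathroom"]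
--
--     pain_mentions = sum(1 for t in texts if any(k in t for k in pain_keywords))
--     distress_mentions = sum(1 for t in texts if any(k in t for k in distress_keywords))
--     request_mentions = sum(1 for t in texts if any(k in t for k in request_keywords))
--
--     parts = [f"Patient {patient_name} voice monitoring ({len(texts)} entries recorded)."]
--
--     if distress_mentions > 0:
--         parts.append(f"Patient expressed distress in {distress_mentions} instance(s) — requires immediate attention.")
--     if pain_mentions > 0:
--         parts.append(f"Pain complaints noted in {pain_mentions} instance(s) — review analgesic protocol.")
--     if request_mentions > 0:
--         parts.append(f"Patient made {request_mentions} care request(s).")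
--     if pain_mentions == 0 and distress_mentions == 0:
--         parts.append("No significant pain or distress indicators detected in voice recordings.")
--
--     return " ".join(parts)
-- ===== SOURCE B (Python) =====
-- def _category_count(keywords, texts):
--     """Keyword-major scan: collect the set of text indices each keyword hits;
--     the category count is the size of the union (a text counts once however
--     many of its keywords it contains)."""
--     hit = set()
--     for k in keywords:
--         for i, t in enumerate(texts):
--             if k in t:
--                 hit.add(i)
--     return len(hit)
--
--
-- def _local_summarize(entries: list, patient_name: str) -> str:
--     """Fallback: rule-based summary without LLM (keyword-major index-set counting)."""
--     texts = [e["text"].lower() for e in entries if e.get("text")]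
--     if not texts:
--         return "No voice data recorded."
--
--     pain_mentions = _category_count(
--         ["pain", "hurt", "hurting", "ache", "uncomfortable", "pressure", "unbearable"], texts)
--     distress_mentions = _category_count(
--         ["help", "can't breathe", "dizzy", "fall", "wrong", "doctor", "chest"], texts)
--     request_mentions = _category_count(
--         ["water", "medication", "reposition", "nurse", "bathroom"], texts)
--
--     parts = [f"Patient {patient_name} voice monitoring ({len(texts)} entries recorded)."]
--
--     if distress_mentions > 0:
--         parts.append(f"Patient expressed distress in {distress_mentions} instance(s) — requires immediate attention.")
--     if pain_mentions > 0:
--         parts.append(f"Pain complaints noted in {pain_mentions} instance(s) — review analgesic protocol.")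
--     if request_mentions > 0:
--         parts.append(f"Patient made {request_mentions} care request(s).")
--     if pain_mentions == 0 and distress_mentions == 0:
--         parts.append("No significant pain or distress indicators detected in voice recordings.")
--
--     return " ".join(parts)
-- ===== Notes on version B (the rewrite author's own statement) =====
-- stated objective: alternative
-- what changed: Counting is transposed: instead of scanning texts and asking any(keyword in text) per category, B loops keyword-major, collecting for each category the set of text indices any of its keywords hits, and the category count is the size of that index-set union; correct because a text is counted exactly once iff some keyword of the category occurs in it.
import Mathlib
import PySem

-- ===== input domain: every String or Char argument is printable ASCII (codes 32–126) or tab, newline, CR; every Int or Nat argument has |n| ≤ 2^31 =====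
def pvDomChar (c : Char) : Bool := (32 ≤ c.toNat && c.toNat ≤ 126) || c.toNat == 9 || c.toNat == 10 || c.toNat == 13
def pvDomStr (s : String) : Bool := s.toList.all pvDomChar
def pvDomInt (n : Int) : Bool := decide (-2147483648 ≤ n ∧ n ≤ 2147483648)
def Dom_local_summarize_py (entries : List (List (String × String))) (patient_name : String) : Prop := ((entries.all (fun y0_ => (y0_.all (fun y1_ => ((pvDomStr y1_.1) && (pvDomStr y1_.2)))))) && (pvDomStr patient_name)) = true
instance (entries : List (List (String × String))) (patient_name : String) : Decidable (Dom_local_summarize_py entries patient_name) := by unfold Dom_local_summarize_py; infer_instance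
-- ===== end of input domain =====

-- B transposes the counting: keyword-major loops collecting per-category sets of matched text indices (count = size of the union) replace A's text-major any()-scans; same output.

-- ===== PORT A =====
def pvPainKw : List String := ["pain", "hurt", "hurting", "ache", "uncomfortable", "pressure", "unbearable"]
def pvDistressKw : List String := ["help", "can't breathe", "dizzy", "fall", "wrong", "doctor", "chest"]
def pvRequestKw : List String := ["water", "medication", "reposition", "nurse", "bathroom"]

-- any(k in t for k in kws)
def pvAnyKw (kws : List String) (t : String) : Bool := kws.any (fun k => PySem.Str.isIn k t)

-- [e["text"].lower() for e in entries if e.get("text")]  (e.get("text") truthy = present and non-empty;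
-- then e["text"] cannot raise, so the comprehension is one filterMap).  Shared: both Pythons build texts identically.
def pvText? (e : List (String × String)) : Option String :=
  match (PySem.Dict.mk e).get? "text" with
  | none => none
  | some s => if s == "" then none else some (PySem.Str.lower s)

-- sum(1 for t in texts if any(k in t for k in kws))
def pvCount (kws : List String) (texts : List String) : Int :=
  texts.foldl (fun acc t => if pvAnyKw kws t then acc + 1 else acc) 0

def local_summarize_py (entries : List (List (String × String))) (patient_name : String) : String :=
  let texts : List String := entries.filterMap pvText?
  if texts.isEmpty then "No voice data recorded." else
  let pain_mentions := pvCount pvPainKw texts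
  let distress_mentions := pvCount pvDistressKw texts
  let request_mentions := pvCount pvRequestKw texts
  let parts : List String := ["Patient " ++ patient_name ++ " voice monitoring (" ++ PySem.Int.toStr (PySem.List.len texts) ++ " entries recorded)."]
  let parts := if distress_mentions > 0 then parts ++ ["Patient expressed distress in " ++ PySem.Int.toStr distress_mentions ++ " instance(s) — requires immediate attention."] else parts
  let parts := if pain_mentions > 0 then parts ++ ["Pain complaints noted in " ++ PySem.Int.toStr pain_mentions ++ " instance(s) — review analgesic protocol."] else parts
  let parts := if request_mentions > 0 then parts ++ ["Patient made " ++ PySem.Int.toStr request_mentions ++ " care request(s)."] else parts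
  let parts := if pain_mentions == 0 && distress_mentions == 0 then parts ++ ["No significant pain or distress indicators detected in voice recordings."] else parts
  PySem.Str.join " " parts

-- ===== PORT B =====
-- _category_count(keywords, texts): keyword-major; hit = set of matched text indices; return len(hit)
def pvCategoryCount (keywords : List String) (texts : List String) : Int :=
  let hit : PySem.Set Int :=
    keywords.foldl (fun hit k =>
      (PySem.List.enumerate texts 0).foldl
        (fun hit it => if PySem.Str.isIn k it.2 then PySem.Set.add hit it.1 else hit) hit)
      PySem.Set.empty
  PySem.Set.len hit

def local_summarize_py_alt (entries : List (List (String × String))) (patient_name : String) : String :=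
  let texts : List String := entries.filterMap pvText?
  if texts.isEmpty then "No voice data recorded." else
  let pain_mentions := pvCategoryCount ["pain", "hurt", "hurting", "ache", "uncomfortable", "pressure", "unbearable"] texts
  let distress_mentions := pvCategoryCount ["help", "can't breathe", "dizzy", "fall", "wrong", "doctor", "chest"] texts
  let request_mentions := pvCategoryCount ["water", "medication", "reposition", "nurse", "bathroom"] texts
  let parts : List String := ["Patient " ++ patient_name ++ " voice monitoring (" ++ PySem.Int.toStr (PySem.List.len texts) ++ " entries recorded)."]
  let parts := if distress_mentions > 0 then parts ++ ["Patient expressed distress in " ++ PySem.Int.toStr distress_mentions ++ " instance(s) — requires immediate attention."] else parts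
  let parts := if pain_mentions > 0 then parts ++ ["Pain complaints noted in " ++ PySem.Int.toStr pain_mentions ++ " instance(s) — review analgesic protocol."] else parts
  let parts := if request_mentions > 0 then parts ++ ["Patient made " ++ PySem.Int.toStr request_mentions ++ " care request(s)."] else parts
  let parts := if pain_mentions == 0 && distress_mentions == 0 then parts ++ ["No significant pain or distress indicators detected in voice recordings."] else parts
  PySem.Str.join " " parts

-- ===== PRECONDITION & SPEC =====
def Spec_local_summarize_py (entries : List (List (String × String))) (patient_name : String) (out : String) : Prop := out = local_summarize_py_alt entries patient_name
instance (entries : List (List (String × String))) (patient_name : String) (out : String) : Decidable (Spec_local_summarize_py entries patient_name out) := by unfold Spec_local_summarize_py; infer_instance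

-- ===== CLAIM (what is proved, stated in full; the proofs are below) =====
def Claim_equal_local_summarize_py : Prop := ∀ (entries : List (List (String × String))) (patient_name : String), Dom_local_summarize_py entries patient_name → Spec_local_summarize_py entries patient_name (local_summarize_py entries patient_name)

-- ===== LEMMAS AND PROOFS =====

-- the inner fold of pvCategoryCount: membership and nodup invariants
theorem pvInner_mem (k : String) (l : List (Int × String)) (s : PySem.Set Int) (y : Int) :
    (y ∈ l.foldl (fun hit it => if PySem.Str.isIn k it.2 then PySem.Set.add hit it.1 else hit) s) ↔
      y ∈ s ∨ ∃ it ∈ l, PySem.Str.isIn k it.2 ∧ y = it.1 := by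
  induction l generalizing s with
  | nil => simp
  | cons it l ih =>
    simp only [List.foldl_cons]
    by_cases h : PySem.Str.isIn k it.2
    · rw [h, if_pos rfl, ih]
      simp [PySem.Set.mem_add]
      tauto
    · simp only [Bool.not_eq_true] at h
      rw [h]
      simp only [Bool.false_eq_true, if_false, ih, List.mem_cons]
      constructor
      · rintro (hs | ⟨it', hm, hk, hy⟩)
        · exact Or.inl hs
        · exact Or.inr ⟨it', Or.inr hm, hk, hy⟩
      · rintro (hs | ⟨it', (rfl | hm), hk, hy⟩)
        · exact Or.inl hs
        · rw [h] at hk; exact absurd hk (by simp)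
        · exact Or.inr ⟨it', hm, hk, hy⟩

theorem pvInner_nodup (k : String) (l : List (Int × String)) (s : PySem.Set Int) (hs : s.Nodup) :
    (l.foldl (fun hit it => if PySem.Str.isIn k it.2 then PySem.Set.add hit it.1 else hit) s).Nodup := by
  induction l generalizing s with
  | nil => exact hs
  | cons it l ih =>
    simp only [List.foldl_cons]
    split_ifs
    · exact ih _ (PySem.Set.nodup_add _ _ hs)
    · exact ih _ hs

-- the outer fold of pvCategoryCount
theorem pvHits_mem (kws : List String) (texts : List String) (s : PySem.Set Int) (y : Int) :
    (y ∈ kws.foldl (fun hit k =>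
        (PySem.List.enumerate texts 0).foldl
          (fun hit it => if PySem.Str.isIn k it.2 then PySem.Set.add hit it.1 else hit) hit) s) ↔
      y ∈ s ∨ ∃ it ∈ PySem.List.enumerate texts 0, pvAnyKw kws it.2 ∧ y = it.1 := by
  induction kws generalizing s with
  | nil => simp [pvAnyKw]
  | cons k kws ih =>
    simp only [List.foldl_cons]
    rw [ih, pvInner_mem]
    simp only [pvAnyKw, List.any_cons, Bool.or_eq_true]
    constructor
    · rintro ((hs | ⟨it, hm, hk, hy⟩) | ⟨it, hm, hk, hy⟩)
      · exact Or.inl hs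
      · exact Or.inr ⟨it, hm, Or.inl hk, hy⟩
      · exact Or.inr ⟨it, hm, Or.inr hk, hy⟩
    · rintro (hs | ⟨it, hm, (hk | hk), hy⟩)
      · exact Or.inl (Or.inl hs)
      · exact Or.inl (Or.inr ⟨it, hm, hk, hy⟩)
      · exact Or.inr ⟨it, hm, hk, hy⟩

theorem pvHits_nodup (kws : List String) (texts : List String) (s : PySem.Set Int) (hs : s.Nodup) :
    (kws.foldl (fun hit k =>
        (PySem.List.enumerate texts 0).foldl
          (fun hit it => if PySem.Str.isIn k it.2 then PySem.Set.add hit it.1 else hit) hit) s).Nodup := by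
  induction kws generalizing s with
  | nil => exact hs
  | cons k kws ih => exact ih _ (pvInner_nodup _ _ _ hs)

-- the reference list of matched indices, in enumeration order
def pvHitList (kws : List String) (texts : List String) : List Int :=
  ((PySem.List.enumerate texts 0).filter (fun it => pvAnyKw kws it.2)).map (·.1)

theorem pvHitList_nodup (kws : List String) (texts : List String) : (pvHitList kws texts).Nodup := by
  have h := PySem.List.pairwise_lt_enumerate texts 0
  have h2 : (((PySem.List.enumerate texts 0).filter (fun it => pvAnyKw kws it.2)).map (·.1)).Pairwise (· < ·) :=
    List.pairwise_map.mpr (List.Pairwise.filter _ h)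
  exact h2.imp (fun hlt => ne_of_lt hlt)

theorem pvHitList_mem (kws : List String) (texts : List String) (y : Int) :
    y ∈ pvHitList kws texts ↔ ∃ it ∈ PySem.List.enumerate texts 0, pvAnyKw kws it.2 ∧ y = it.1 := by
  simp only [pvHitList, List.mem_map, List.mem_filter]
  constructor
  · rintro ⟨it, ⟨hm, hk⟩, hy⟩; exact ⟨it, hm, hk, hy.symm⟩
  · rintro ⟨it, hm, hk, hy⟩; exact ⟨it, ⟨hm, hk⟩, hy.symm⟩

theorem pvCount_eq_countP (kws : List String) (texts : List String) (a : Int) :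
    texts.foldl (fun acc t => if pvAnyKw kws t then acc + 1 else acc) a
      = a + (texts.countP (pvAnyKw kws) : Int) := by
  induction texts generalizing a with
  | nil => simp
  | cons t ts ih =>
    simp only [List.foldl_cons, List.countP_cons, ih]
    by_cases h : pvAnyKw kws t
    · simp [h]; ring
    · simp [h]

theorem pvCategoryCount_eq (kws : List String) (texts : List String) :
    pvCategoryCount kws texts = pvCount kws texts := by
  unfold pvCategoryCount pvCount
  have hperm : (kws.foldl (fun hit k =>
      (PySem.List.enumerate texts 0).foldl
        (fun hit it => if PySem.Str.isIn k it.2 then PySem.Set.add hit it.1 else hit) hit)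
      PySem.Set.empty).Perm (pvHitList kws texts) := by
    apply (List.perm_ext_iff_of_nodup (pvHits_nodup kws texts _ (by simp [PySem.Set.empty])) (pvHitList_nodup kws texts)).mpr
    intro y
    rw [pvHits_mem, pvHitList_mem]
    simp [PySem.Set.empty]
  have hlen := hperm.length_eq
  simp only [PySem.Set.len]
  rw [hlen]
  have hL : (pvHitList kws texts).length = texts.countP (pvAnyKw kws) := by
    conv_rhs => rw [← PySem.List.map_snd_enumerate texts 0]
    rw [List.countP_map]
    simp [pvHitList, ← List.countP_eq_length_filter]
    rfl
  rw [hL, pvCount_eq_countP]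
  simp

-- ===== VERDICT (by name: the statement is the Claim_ definition above) =====
theorem local_summarize_py_spec : Claim_equal_local_summarize_py := by
  intro entries patient_name _
  unfold Spec_local_summarize_py local_summarize_py local_summarize_py_alt
  simp only [pvCategoryCount_eq, pvPainKw, pvDistressKw, pvRequestKw]
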